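-- pv_equiv track=rewrite | github.com/b00lduck/433mhz_thermo_spoof | send_kedsum.py | crc4
-- ===== SOURCE A (Python) =====
-- def crc4(msg):
--   remainder = 0
--   poly = 0x3 << 4
--   bit = 0
--
--   for x in range(4):
--       remainder ^= msg[x]
--       for bit in range(8):
--           if remainder & 0x80:
--               remainder = (remainder << 1) ^ poly
--           else:
--               remainder = (remainder << 1)
--   return remainder >> 4 & 0x0f
-- ===== SOURCE B (Python) =====
-- def _build_table():
--     table = []
--     for i in range(256):
--         r = i
--         for _ in range(8):
--             r = ((r << 1) ^ 0x30) if r & 0x80 else (r << 1)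
--         table.append(r & 0xFF)
--     return table
--
-- _CRC4_TABLE = _build_table()
--
-- def crc4(msg):
--     rem = 0
--     for x in range(4):
--         rem = _CRC4_TABLE[(rem ^ msg[x]) & 0xFF]
--     return rem >> 4
-- ===== Notes on version B (the rewrite author's own statement) =====
-- stated objective: alternative
-- what changed: B precomputes a 256-entry CRC table once (running the bit loop for every byte value and keeping the low byte) and processes each message byte with a single table lookup, replacing A's inner 8-iteration shift/xor loop; the unmasked remainder of A agrees with B's masked one on bits 4-7, which is proved.
import Mathlib
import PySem

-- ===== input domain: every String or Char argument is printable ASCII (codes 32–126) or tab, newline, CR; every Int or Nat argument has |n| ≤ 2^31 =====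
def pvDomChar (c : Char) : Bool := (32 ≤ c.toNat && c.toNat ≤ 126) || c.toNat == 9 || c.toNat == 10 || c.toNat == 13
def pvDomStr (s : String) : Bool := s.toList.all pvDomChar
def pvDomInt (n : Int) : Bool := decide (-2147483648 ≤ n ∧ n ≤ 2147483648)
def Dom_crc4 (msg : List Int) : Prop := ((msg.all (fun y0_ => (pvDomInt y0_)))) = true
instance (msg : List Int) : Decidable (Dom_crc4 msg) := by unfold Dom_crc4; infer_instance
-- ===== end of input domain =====

-- B replaces A's inner 8-iteration bit loop by a single lookup in a 256-entry table
-- precomputed once from the same bit loop (objective: alternative/idiomatic table-driven CRC).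

-- ===== PORT A =====
-- literal port of A: nested loops, remainder never masked (it grows/stays negative);
-- msg[x] is read with default 0 — Pre_crc4 (len ≥ 4) excludes the IndexError inputs.
def crc4 (msg : List Int) : Int :=
  let poly : Int := (3 : Int) <<< (4 : Nat)
  let rem : Int :=
    (PySem.List.pyRange 0 4).foldl
      (fun r x =>
        (PySem.List.pyRange 0 8).foldl
          (fun r2 _ =>
            if PySem.Int.band r2 128 ≠ 0 then PySem.Int.bxor (r2 <<< (1 : Nat)) poly
            else r2 <<< (1 : Nat))
          (PySem.Int.bxor r (PySem.List.pyGetD msg x 0))) 0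
  PySem.Int.band (rem >>> (4 : Nat)) 15

-- ===== PORT B =====
-- one table entry: run the 8-step bit loop on i and keep the low byte
def crc4BuildEntry (i : Int) : Int :=
  PySem.Int.band
    ((PySem.List.pyRange 0 8).foldl
      (fun r _ =>
        if PySem.Int.band r 128 ≠ 0 then PySem.Int.bxor (r <<< (1 : Nat)) 48
        else r <<< (1 : Nat)) i) 255

def crc4Table : List Int := (PySem.List.pyRange 0 256).map crc4BuildEntry

def crc4_alt (msg : List Int) : Int :=
  ((PySem.List.pyRange 0 4).foldl
    (fun rem x =>
      PySem.List.pyGetD crc4Table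
        (PySem.Int.band (PySem.Int.bxor rem (PySem.List.pyGetD msg x 0)) 255) 0) 0)
    >>> (4 : Nat)

-- ===== PRECONDITION & SPEC =====
-- Pre_ excludes exactly the inputs (fewer than 4 elements) on which Python A raises IndexError.
def Pre_crc4 (msg : List Int) : Prop := 4 ≤ msg.length
instance (msg : List Int) : Decidable (Pre_crc4 msg) := by unfold Pre_crc4; infer_instance
def pvWitness_crc4 : List Int := [1, 2, 3, 4]

def Spec_crc4 (msg : List Int) (out : Int) : Prop := out = crc4_alt msg
instance (msg : List Int) (out : Int) : Decidable (Spec_crc4 msg out) := by unfold Spec_crc4; infer_instance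

-- ===== CLAIM (what is proved, stated in full; the proofs are below) =====
def Claim_equal_crc4 : Prop := ∀ (msg : List Int), Dom_crc4 msg → Pre_crc4 msg → Spec_crc4 msg (crc4 msg)

-- ===== LEMMAS AND PROOFS =====

-- the shared one-bit step (A's inner loop body / B's table builder body)
def bitStep (r : Int) : Int :=
  if PySem.Int.band r 128 ≠ 0 then PySem.Int.bxor (r <<< (1 : Nat)) 48 else r <<< (1 : Nat)

-- eight bit steps (A's inner loop / B's table builder loop)
def bits8 (r : Int) : Int := (PySem.List.pyRange 0 8).foldl (fun r2 _ => bitStep r2) r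

lemma crc4_as_bits8 (msg : List Int) :
    crc4 msg = PySem.Int.band
      (((PySem.List.pyRange 0 4).foldl
        (fun r x => bits8 (PySem.Int.bxor r (PySem.List.pyGetD msg x 0))) 0) >>> (4 : Nat)) 15 := by
  rfl

lemma crc4BuildEntry_eq (i : Int) : crc4BuildEntry i = PySem.Int.band (bits8 i) 255 := by
  rfl

lemma band255 (a : Int) : PySem.Int.band a 255 = a % 256 := by
  by_cases h : 0 ≤ a
  · rw [PySem.Int.band_of_nonneg h (by norm_num)]
    have hn : a.toNat &&& (255:Int).toNat = a.toNat % 256 := by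
      have := Nat.and_two_pow_sub_one_eq_mod a.toNat 8
      norm_num at this ⊢; exact this
    rw [hn]; omega
  · simp only [PySem.Int.band, if_neg h, if_pos (show (0:Int) ≤ 255 by norm_num)]
    have hn : (255:Int).toNat &&& (-a - 1).toNat = (-a - 1).toNat % 256 := by
      rw [Nat.and_comm]
      have := Nat.and_two_pow_sub_one_eq_mod (-a - 1).toNat 8
      norm_num at this ⊢; exact this
    rw [hn]; omega

lemma band15 (a : Int) : PySem.Int.band a 15 = a % 16 := by
  by_cases h : 0 ≤ a
  · rw [PySem.Int.band_of_nonneg h (by norm_num)]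
    have hn : a.toNat &&& (15:Int).toNat = a.toNat % 16 := by
      have := Nat.and_two_pow_sub_one_eq_mod a.toNat 4
      norm_num at this ⊢; exact this
    rw [hn]; omega
  · simp only [PySem.Int.band, if_neg h, if_pos (show (0:Int) ≤ 15 by norm_num)]
    have hn : (15:Int).toNat &&& (-a - 1).toNat = (-a - 1).toNat % 16 := by
      rw [Nat.and_comm]
      have := Nat.and_two_pow_sub_one_eq_mod (-a - 1).toNat 4
      norm_num at this ⊢; exact this
    rw [hn]; omega

lemma nat128 (n : Nat) : n &&& 128 = if n % 256 < 128 then 0 else 128 := by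
  have h1 : n &&& 128 = (n.testBit 7).toNat * 128 := by
    have := Nat.and_two_pow n 7; norm_num at this ⊢; exact this
  rw [Nat.testBit_eq_decide_div_mod_eq] at h1
  split_ifs with hlt
  · have hd : n / 128 % 2 = 0 := by omega
    rw [hd] at h1; simpa using h1
  · have hd : n / 128 % 2 = 1 := by omega
    rw [hd] at h1; simpa using h1

lemma band128 (a : Int) : PySem.Int.band a 128 = if a % 256 < 128 then 0 else 128 := by
  by_cases h : 0 ≤ a
  · rw [PySem.Int.band_of_nonneg h (by norm_num)]
    have hn : a.toNat &&& (128:Int).toNat = if a.toNat % 256 < 128 then 0 else 128 := by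
      have := nat128 a.toNat; norm_num at this ⊢; exact this
    rw [hn]; split_ifs <;> omega
  · simp only [PySem.Int.band, if_neg h, if_pos (show (0:Int) ≤ 128 by norm_num)]
    have hn : (128:Int).toNat &&& (-a - 1).toNat
        = if (-a - 1).toNat % 256 < 128 then 0 else 128 := by
      rw [Nat.and_comm]
      have := nat128 (-a - 1).toNat; norm_num at this ⊢; exact this
    rw [hn]; split_ifs <;> omega

lemma natxor_mod (u v : Nat) : (u ^^^ v) % 256 = (u % 256) ^^^ (v % 256) := by
  have := @Nat.xor_mod_two_pow u v 8
  norm_num at this; exact this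

set_option maxRecDepth 4096 in
lemma xor255 (q : Nat) (hq : q < 256) : q ^^^ 255 = 255 - q := by
  have h : ∀ q ∈ List.range 256, q ^^^ 255 = 255 - q := by decide
  exact h q (List.mem_range.mpr hq)

lemma xor_lt (p q : Nat) (hp : p < 256) (hq : q < 256) : p ^^^ q < 256 := by
  have := Nat.xor_lt_two_pow (x := p) (y := q) (n := 8) (by omega) (by omega)
  omega

lemma xor_compl (p q : Nat) (hp : p < 256) (hq : q < 256) :
    p ^^^ (255 - q) = 255 - (p ^^^ q) := by
  rw [← xor255 q hq, ← Nat.xor_assoc]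
  exact xor255 _ (xor_lt p q hp hq)

-- xor mod 256 depends only on the operands mod 256
lemma bxor_mod (a b : Int) :
    PySem.Int.bxor a b % 256 = PySem.Int.bxor (a % 256) (b % 256) % 256 := by
  have ha : 0 ≤ a % 256 := by omega
  have hb : 0 ≤ b % 256 := by omega
  rw [PySem.Int.bxor_of_nonneg ha hb]
  by_cases h : 0 ≤ a <;> by_cases h' : 0 ≤ b
  · rw [PySem.Int.bxor_of_nonneg h h']
    have h1 : (a % 256).toNat = a.toNat % 256 := by omega
    have h2 : (b % 256).toNat = b.toNat % 256 := by omega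
    have h3 := natxor_mod a.toNat b.toNat
    rw [h1, h2, ← h3]
    omega
  · simp only [PySem.Int.bxor, if_pos h, if_neg h']
    have h1 : (a % 256).toNat = a.toNat % 256 := by omega
    have h2 : (b % 256).toNat = 255 - ((-b - 1).toNat % 256) := by omega
    have h3 := natxor_mod a.toNat (-b - 1).toNat
    have h4 := xor_lt (a.toNat % 256) ((-b - 1).toNat % 256) (by omega) (by omega)
    rw [h1, h2, xor_compl _ _ (by omega) (by omega), ← h3]
    omega
  · simp only [PySem.Int.bxor, if_neg h, if_pos h']
    have h1 : (b % 256).toNat = b.toNat % 256 := by omega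
    have h2 : (a % 256).toNat = 255 - ((-a - 1).toNat % 256) := by omega
    have h3 := natxor_mod (-a - 1).toNat b.toNat
    have h4 := xor_lt (((-a - 1).toNat % 256)) (b.toNat % 256) (by omega) (by omega)
    have h6 : (255 - (-a - 1).toNat % 256) ^^^ (b.toNat % 256)
        = 255 - ((-a - 1).toNat % 256 ^^^ b.toNat % 256) := by
      rw [Nat.xor_comm, xor_compl _ _ (by omega) (by omega), Nat.xor_comm]
    rw [h1, h2, h6, ← h3]
    omega
  · simp only [PySem.Int.bxor, if_neg h, if_neg h']
    have h1 : (a % 256).toNat = 255 - ((-a - 1).toNat % 256) := by omega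
    have h2 : (b % 256).toNat = 255 - ((-b - 1).toNat % 256) := by omega
    have h3 := natxor_mod (-a - 1).toNat (-b - 1).toNat
    have h5 := xor_lt (((-a - 1).toNat % 256)) ((-b - 1).toNat % 256) (by omega) (by omega)
    have h6 : (255 - (-a - 1).toNat % 256) ^^^ (255 - (-b - 1).toNat % 256)
        = ((-a - 1).toNat % 256) ^^^ ((-b - 1).toNat % 256) := by
      rw [xor_compl _ _ (by omega) (by omega), Nat.xor_comm,
          xor_compl _ _ (by omega) (by omega), Nat.xor_comm]
      omega
    rw [h1, h2, h6, ← h3]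
    omega

lemma shl1_mod (x y : Int) (h : x % 256 = y % 256) :
    (x <<< (1 : Nat)) % 256 = (y <<< (1 : Nat)) % 256 := by
  have hx : x <<< (1 : Nat) = x * 2 := by simp [Int.shiftLeft_eq]
  have hy : y <<< (1 : Nat) = y * 2 := by simp [Int.shiftLeft_eq]
  rw [hx, hy]; omega

lemma bitStep_mod (a b : Int) (h : a % 256 = b % 256) : bitStep a % 256 = bitStep b % 256 := by
  unfold bitStep
  rw [band128 a, band128 b, h]
  split_ifs <;>
    first
      | rw [bxor_mod, bxor_mod (b <<< (1 : Nat)), shl1_mod a b h]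
      | exact shl1_mod a b h

lemma bits8_mod (a b : Int) (h : a % 256 = b % 256) : bits8 a % 256 = bits8 b % 256 := by
  have hr : PySem.List.pyRange 0 8 = [0, 1, 2, 3, 4, 5, 6, 7] := by decide
  simp only [bits8, hr, List.foldl]
  exact bitStep_mod _ _ (bitStep_mod _ _ (bitStep_mod _ _ (bitStep_mod _ _
    (bitStep_mod _ _ (bitStep_mod _ _ (bitStep_mod _ _ (bitStep_mod _ _ h)))))))

lemma table_lookup (r : Int) (h0 : 0 ≤ r) (h1 : r < 256) :
    PySem.List.pyGetD crc4Table r 0 = PySem.Int.band (bits8 r) 255 := by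
  unfold crc4Table
  rw [show (256 : Int) = ((256 : Nat) : Int) by norm_num,
      show r = ((r.toNat : Nat) : Int) by omega,
      PySem.List.pyGetD_map_pyRange crc4BuildEntry 256 r.toNat 0 (by omega),
      crc4BuildEntry_eq]

-- one byte of B tracks one byte of A modulo 256
lemma byte_step (rA rB m : Int) (h : rB = rA % 256) :
    PySem.List.pyGetD crc4Table
      (PySem.Int.band (PySem.Int.bxor rB m) 255) 0
      = bits8 (PySem.Int.bxor rA m) % 256 := by
  rw [band255]
  have hx : PySem.Int.bxor rB m % 256 = PySem.Int.bxor rA m % 256 := by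
    rw [bxor_mod, bxor_mod rA m, h]
    have : rA % 256 % 256 = rA % 256 := by omega
    rw [this]
  rw [table_lookup _ (by omega) (by omega), band255]
  exact bits8_mod _ _ (by omega)

-- ===== VERDICT (by name: the statement is the Claim_ definition above) =====
theorem crc4_spec : Claim_equal_crc4 := by
  intro msg _ _
  unfold Spec_crc4
  rw [crc4_as_bits8]
  unfold crc4_alt
  have hr4 : PySem.List.pyRange 0 4 = [0, 1, 2, 3] := by decide
  rw [hr4]
  simp only [List.foldl]
  have h1 := byte_step 0 0 (PySem.List.pyGetD msg 0 0) (by norm_num)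
  have h2 := byte_step _ _ (PySem.List.pyGetD msg 1 0) h1
  have h3 := byte_step _ _ (PySem.List.pyGetD msg 2 0) h2
  have h4 := byte_step _ _ (PySem.List.pyGetD msg 3 0) h3
  rw [h4, band15, Int.shiftRight_eq_div_pow, Int.shiftRight_eq_div_pow]
  norm_num
  omega
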